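-- pv_equiv track=rewrite | github.com/amin-jalilzadeh-tu/E_Plus_2030_py | ventilation/assign_ventilation_values.py | find_vent_overrides
-- ===== SOURCE A (Python) =====
-- def find_vent_overrides(
--     building_id,
--     building_function,
--     age_range,
--     scenario,
--     calibration_stage,
--     user_config
-- ):
--     """
--     Return a list of user_config rows that match all provided criteria:
--       - building_id
--       - building_function
--       - age_range
--       - scenario
--       - calibration_stage
--     """
--     matches = []
--     if user_config:
--         for row in user_config:
--             # building_id match if present
--             if "building_id" in row and row["building_id"] != building_id:
--                 continue
--             # building_function match if present
--             if "building_function" in row and row["building_function"] != building_function: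
--                 continue
--             # age_range match if present
--             if "age_range" in row and row["age_range"] != age_range:
--                 continue
--             # scenario match if present
--             if "scenario" in row and row["scenario"] != scenario:
--                 continue
--             # calibration_stage match if present
--             if "calibration_stage" in row and row["calibration_stage"] != calibration_stage:
--                 continue
--             matches.append(row)
--     return matches
-- ===== SOURCE B (Python) =====
-- def find_vent_overrides(
--     building_id,
--     building_function,
--     age_range,
--     scenario,
--     calibration_stage,
--     user_config
-- ):
--     # Staged sieve: start from all rows and narrow the survivor list with one
--     # full filtering pass per criterion, instead of checking all five criteria
--     # per row in a single pass.
--     survivors = list(user_config) if user_config else []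
--     for key, expected in (
--         ("building_id", building_id),
--         ("building_function", building_function),
--         ("age_range", age_range),
--         ("scenario", scenario),
--         ("calibration_stage", calibration_stage),
--     ):
--         survivors = [row for row in survivors if key not in row or row[key] == expected]
--     return survivors
-- ===== Notes on version B (the rewrite author's own statement) =====
-- stated objective: alternative
-- what changed: A makes one pass over the rows checking all five criteria per row with guard/continue branches; B is a staged sieve that narrows a survivor list with five successive filtering passes, one criterion per pass (filters commute, so the result is identical).
import Mathlib
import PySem

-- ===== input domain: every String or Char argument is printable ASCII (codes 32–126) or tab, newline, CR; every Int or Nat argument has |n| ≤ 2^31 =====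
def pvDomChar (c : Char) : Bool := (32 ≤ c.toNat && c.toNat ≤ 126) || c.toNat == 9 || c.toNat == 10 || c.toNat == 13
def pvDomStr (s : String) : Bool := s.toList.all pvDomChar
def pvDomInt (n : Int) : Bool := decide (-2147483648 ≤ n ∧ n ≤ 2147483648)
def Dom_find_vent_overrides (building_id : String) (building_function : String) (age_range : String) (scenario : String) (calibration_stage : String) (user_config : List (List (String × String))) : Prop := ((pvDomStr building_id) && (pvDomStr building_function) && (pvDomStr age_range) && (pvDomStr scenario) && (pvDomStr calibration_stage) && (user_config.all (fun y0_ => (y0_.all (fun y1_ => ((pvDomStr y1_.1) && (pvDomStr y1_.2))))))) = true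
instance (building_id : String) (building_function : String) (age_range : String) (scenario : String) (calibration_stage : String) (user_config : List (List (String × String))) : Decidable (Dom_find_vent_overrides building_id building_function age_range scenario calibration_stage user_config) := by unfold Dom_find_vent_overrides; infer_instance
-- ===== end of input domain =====

-- B replaces A's single pass with five per-row guard branches by a staged sieve: five successive
-- filtering passes over a survivor list, one criterion per pass (objective: alternative).
-- Python dicts arrive as association lists; `rowGet row k` ports `row[k]` / `k in row` (first-match lookup, exact for dicts).
def rowGet (row : List (String × String)) (k : String) : Option String :=
  (row.find? (fun kv => kv.1 == k)).map (·.2)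

-- ===== PORT A =====
-- the body of A's for-loop: the chain of `continue` guards; false = continue (row skipped)
def ventRowPass (building_id building_function age_range scenario calibration_stage : String)
    (row : List (String × String)) : Bool :=
  if (match rowGet row "building_id" with | some v => v != building_id | none => false) then false
  else if (match rowGet row "building_function" with | some v => v != building_function | none => false) then false
  else if (match rowGet row "age_range" with | some v => v != age_range | none => false) then false
  else if (match rowGet row "scenario" with | some v => v != scenario | none => false) then false
  else if (match rowGet row "calibration_stage" with | some v => v != calibration_stage | none => false) then false
  else true

def find_vent_overrides (building_id : String) (building_function : String) (age_range : String) (scenario : String) (calibration_stage : String) (user_config : List (List (String × String))) : List (List (String × String)) :=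
  -- `if user_config:` — a falsy (empty) list skips the loop, which the fold over [] also does
  user_config.foldl
    (fun acc row =>
      if ventRowPass building_id building_function age_range scenario calibration_stage row
      then acc ++ [row] else acc)
    []

-- ===== PORT B =====
-- one sieve pass: keep the rows on which `key` is absent or maps to `expected`
def sievePass (ke : String × String) (surv : List (List (String × String))) : List (List (String × String)) :=
  surv.filter (fun row => match rowGet row ke.1 with | none => true | some v => v == ke.2)

def find_vent_overrides_alt (building_id : String) (building_function : String) (age_range : String) (scenario : String) (calibration_stage : String) (user_config : List (List (String × String))) : List (List (String × String)) :=
  -- `list(user_config) if user_config else []`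
  let survivors := if user_config.isEmpty then [] else user_config
  ([("building_id", building_id), ("building_function", building_function),
    ("age_range", age_range), ("scenario", scenario),
    ("calibration_stage", calibration_stage)] : List (String × String)).foldl
    (fun surv ke => sievePass ke surv) survivors

-- ===== PRECONDITION & SPEC =====
def Spec_find_vent_overrides (building_id : String) (building_function : String) (age_range : String) (scenario : String) (calibration_stage : String) (user_config : List (List (String × String))) (out : List (List (String × String))) : Prop := out = find_vent_overrides_alt building_id building_function age_range scenario calibration_stage user_config
instance (building_id : String) (building_function : String) (age_range : String) (scenario : String) (calibration_stage : String) (user_config : List (List (String × String))) (out : List (List (String × String))) : Decidable (Spec_find_vent_overrides building_id building_function age_range scenario calibration_stage user_config out) := by unfold Spec_find_vent_overrides; infer_instance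

-- ===== CLAIM (what is proved, stated in full; the proofs are below) =====
def Claim_equal_find_vent_overrides : Prop := ∀ (building_id : String) (building_function : String) (age_range : String) (scenario : String) (calibration_stage : String) (user_config : List (List (String × String))), Dom_find_vent_overrides building_id building_function age_range scenario calibration_stage user_config → Spec_find_vent_overrides building_id building_function age_range scenario calibration_stage user_config (find_vent_overrides building_id building_function age_range scenario calibration_stage user_config)

-- ===== LEMMAS AND PROOFS =====

-- staged sieve over a criteria list = one filter by the conjunction of the criteria
lemma foldl_sievePass_eq_filter (crits : List (String × String))
    (acc : List (List (String × String))) :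
    crits.foldl (fun surv ke => sievePass ke surv) acc =
      acc.filter (fun row => crits.all
        (fun ke => match rowGet row ke.1 with | none => true | some v => v == ke.2)) := by
  induction crits generalizing acc with
  | nil => simp
  | cons c cs ih =>
    rw [List.foldl_cons, ih]
    simp only [sievePass]
    rw [List.filter_filter]
    congr 1
    funext row
    simp [List.all_cons, Bool.and_comm]

-- per-row: A's guard chain decides exactly the conjunction of the five criteria
lemma ventRowPass_eq_all (b f a s c : String) (row : List (String × String)) :
    ventRowPass b f a s c row =
      ([("building_id", b), ("building_function", f), ("age_range", a),
        ("scenario", s), ("calibration_stage", c)] : List (String × String)).all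
        (fun ke => match rowGet row ke.1 with | none => true | some v => v == ke.2) := by
  simp only [ventRowPass, List.all_cons, List.all_nil, Bool.and_true]
  cases rowGet row "building_id" <;> cases rowGet row "building_function" <;>
    cases rowGet row "age_range" <;> cases rowGet row "scenario" <;>
    cases rowGet row "calibration_stage" <;>
    all_goals (simp only [bne]; try split_ifs) <;> simp_all

-- the append-accumulator fold is List.filter
lemma fold_append_if_eq_filter {α : Type} (p : α → Bool) (xs : List α) (acc : List α) :
    xs.foldl (fun m r => if p r then m ++ [r] else m) acc = acc ++ xs.filter p := by
  induction xs generalizing acc with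
  | nil => simp
  | cons x xs ih =>
    simp only [List.foldl_cons, List.filter_cons]
    by_cases h : p x <;> simp [h, ih]

-- ===== VERDICT (by name: the statement is the Claim_ definition above) =====
theorem find_vent_overrides_spec : Claim_equal_find_vent_overrides := by
  intro b f a s c uc _
  unfold Spec_find_vent_overrides find_vent_overrides find_vent_overrides_alt
  rw [fold_append_if_eq_filter, foldl_sievePass_eq_filter]
  simp only [List.nil_append]
  have hsurv : (if uc.isEmpty then [] else uc) = uc := by
    cases uc <;> simp
  rw [hsurv]
  congr 1
  funext row
  exact ventRowPass_eq_all b f a s c row
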